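-- pv_equiv track=rewrite | github.com/MatheusNevs/code-practice | exercícios/apc/projeto_final.py | checar_area
-- ===== SOURCE A (Python) =====
-- def checar_area(frase):
--     area = 'nao informado'
--     if 'metros' in frase or 'm2' in frase:
--         frase_aux = frase.split()
--         for k, i in enumerate(frase_aux):
--             if 'metros' in i:
--                 area = frase_aux[k - 1]
--             if 'm2' in i:
--                 area = frase_aux[k - 1]
--     return f'Area: {area}'
-- ===== SOURCE B (Python) =====
-- def checar_area(frase):
--     palavras = frase.split()
--     for idx in range(len(palavras) - 1, -1, -1):
--         if 'metros' in palavras[idx] or 'm2' in palavras[idx]: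
--             return f'Area: {palavras[idx - 1]}'
--     return 'Area: nao informado'
-- ===== Notes on version B (the rewrite author's own statement) =====
-- stated objective: simpler
-- what changed: Replaces the whole-string pre-check plus forward scan that overwrites the result on every matching word with a single backward scan over the word list that returns on the first match from the end (the last match), dropping the redundant guard and the accumulator.
import Mathlib
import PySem

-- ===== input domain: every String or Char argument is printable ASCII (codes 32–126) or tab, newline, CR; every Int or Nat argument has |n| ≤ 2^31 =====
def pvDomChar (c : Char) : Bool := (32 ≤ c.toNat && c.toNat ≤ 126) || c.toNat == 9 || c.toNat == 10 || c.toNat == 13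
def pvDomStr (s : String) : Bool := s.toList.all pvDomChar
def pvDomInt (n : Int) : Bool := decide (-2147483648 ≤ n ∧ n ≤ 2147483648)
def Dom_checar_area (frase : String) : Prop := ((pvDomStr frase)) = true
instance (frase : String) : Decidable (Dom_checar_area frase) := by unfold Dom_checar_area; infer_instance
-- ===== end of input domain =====

-- B drops A's redundant whole-string pre-check and scans the word list backwards,
-- returning on the first (i.e. last) matching word; equal return values are proved.

-- ===== PORT A =====
def checar_area (frase : String) : String :=
  let area := "nao informado"
  if PySem.Str.isIn "metros" frase || PySem.Str.isIn "m2" frase then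
    let frase_aux := PySem.Str.split₀ frase
    let area := (PySem.List.enumerate frase_aux).foldl (fun area ki =>
      let area := if PySem.Str.isIn "metros" ki.2 then
          (PySem.List.pyGet? frase_aux (ki.1 - 1)).getD area else area
      if PySem.Str.isIn "m2" ki.2 then
          (PySem.List.pyGet? frase_aux (ki.1 - 1)).getD area else area) area
    "Area: " ++ area
  else
    "Area: " ++ area

-- ===== PORT B =====
-- 'for idx in range(len(palavras)-1, -1, -1): …' with early return; the argument is the
-- number of indices still to check, so index j is inspected when the argument is j+1.
def checarAltLoop (palavras : List String) : Nat → String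
  | 0 => "Area: nao informado"
  | j + 1 =>
    if PySem.Str.isIn "metros" ((PySem.List.pyGet? palavras (j : Int)).getD "") ||
       PySem.Str.isIn "m2" ((PySem.List.pyGet? palavras (j : Int)).getD "") then
      "Area: " ++ (PySem.List.pyGet? palavras ((j : Int) - 1)).getD ""
    else
      checarAltLoop palavras j

def checar_area_alt (frase : String) : String :=
  let palavras := PySem.Str.split₀ frase
  checarAltLoop palavras palavras.length

-- ===== PRECONDITION & SPEC =====
def Spec_checar_area (frase : String) (out : String) : Prop := out = checar_area_alt frase
instance (frase : String) (out : String) : Decidable (Spec_checar_area frase out) := by unfold Spec_checar_area; infer_instance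

-- ===== CLAIM (what is proved, stated in full; the proofs are below) =====
def Claim_equal_checar_area : Prop := ∀ (frase : String), Dom_checar_area frase → Spec_checar_area frase (checar_area frase)

-- ===== LEMMAS AND PROOFS =====

-- the match test both programs apply to a word
def pvMatch (w : String) : Bool := PySem.Str.isIn "metros" w || PySem.Str.isIn "m2" w

-- the last matching word's predecessor, scanning indices n-1 … 0 downwards (proof skeleton)
def pvScan (ws : List String) : Nat → Option String
  | 0 => none
  | j + 1 =>
    if pvMatch ((PySem.List.pyGet? ws (j : Int)).getD "") then
      some ((PySem.List.pyGet? ws ((j : Int) - 1)).getD "")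
    else pvScan ws j

theorem pv_pyGet_nat (ws : List String) (j : Nat) (h : j < ws.length) :
    PySem.List.pyGet? ws (j : Int) = some ws[j] := by
  rw [PySem.List.pyGet?_natCast]
  exact List.getElem?_eq_getElem h

theorem pv_pyGet_pred (ws : List String) (m : Nat) (h : m < ws.length) :
    ∃ v, PySem.List.pyGet? ws ((m : Int) - 1) = some v := by
  simp only [PySem.List.pyGet?, PySem.List.pyIdx?]
  split_ifs with h1 h2 h3
  · refine ⟨ws[((m : Int) - 1).toNat]'(by omega), ?_⟩
    simp
  · omega
  · refine ⟨ws[ws.length - 1]'(by omega), ?_⟩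
    simp
    rw [show ws.length - (1 - m) = ws.length - 1 from by omega]
    exact List.getElem?_eq_getElem (by omega)
  · omega

-- every word produced by split() is an infix of the original character list
theorem pv_split_go_mem (w : List Char) :
    ∀ (rest cur : List Char) (acc : List (List Char)),
      w ∈ PySem.Chars.split₀.go rest cur acc → w ∈ acc ∨ w <:+: (cur.reverse ++ rest) := by
  intro rest
  induction rest with
  | nil =>
    intro cur acc h
    rw [PySem.Chars.split₀.go] at h
    split at h
    · exact Or.inl (List.mem_reverse.mp h)
    · rcases List.mem_cons.mp (List.mem_reverse.mp h) with h | h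
      · exact Or.inr ⟨[], [], by simp [h]⟩
      · exact Or.inl h
  | cons c rest ih =>
    intro cur acc h
    rw [PySem.Chars.split₀.go] at h
    split at h
    · split at h
      · rcases ih _ _ h with h' | h'
        · exact Or.inl h'
        · exact Or.inr (h'.trans ⟨cur.reverse ++ [c], [], by simp⟩)
      · rcases ih _ _ h with h' | h'
        · rcases List.mem_cons.mp h' with h'' | h''
          · exact Or.inr (by rw [h'']; exact ⟨[], c :: rest, by simp⟩)
          · exact Or.inl h''
        · exact Or.inr (h'.trans ⟨cur.reverse ++ [c], [], by simp⟩)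
    · rcases ih _ _ h with h' | h'
      · exact Or.inl h'
      · exact Or.inr (by simpa using h')

theorem pv_mem_split₀_infix (w : String) (frase : String)
    (h : w ∈ PySem.Str.split₀ frase) : w.toList <:+: frase.toList := by
  rcases List.mem_map.mp h with ⟨u, hu, rfl⟩
  rcases pv_split_go_mem u frase.toList [] [] hu with h' | h'
  · simp at h'
  · simpa using h'

-- B's loop in terms of pvScan
theorem pv_altLoop_eq (ws : List String) (n : Nat) :
    checarAltLoop ws n = "Area: " ++ ((pvScan ws n).getD "nao informado") := by
  induction n with
  | zero => rfl
  | succ j ih =>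
    rw [checarAltLoop, pvScan]
    simp only [pvMatch]
    by_cases hm : (PySem.Str.isIn "metros" ((PySem.List.pyGet? ws (j : Int)).getD "") ||
        PySem.Str.isIn "m2" ((PySem.List.pyGet? ws (j : Int)).getD "")) = true
    · rw [if_pos hm, if_pos hm, Option.getD_some]
    · rw [if_neg hm, if_neg hm]
      exact ih

-- key lemma: A's foldl over the first m enumerated words equals pvScan with default acc
theorem pv_foldl_eq_scan (ws : List String) :
    ∀ (m : Nat), m ≤ ws.length → ∀ (acc : String),
      ((PySem.List.enumerate ws).take m).foldl (fun area ki =>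
        let area := if PySem.Str.isIn "metros" ki.2 then
            (PySem.List.pyGet? ws (ki.1 - 1)).getD area else area
        if PySem.Str.isIn "m2" ki.2 then
            (PySem.List.pyGet? ws (ki.1 - 1)).getD area else area) acc
      = (pvScan ws m).getD acc := by
  intro m
  induction m with
  | zero => intro _ acc; simp [pvScan]
  | succ m ih =>
    intro hm acc
    have hmlt : m < ws.length := by omega
    have hget : (PySem.List.enumerate ws)[m]? = some ((m : Int), ws[m]) := by
      rw [PySem.List.getElem?_enumerate]
      simp [List.getElem?_eq_getElem hmlt]
    rw [List.take_add_one, hget]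
    rw [List.foldl_append, ih (by omega) acc]
    rcases pv_pyGet_pred ws m hmlt with ⟨v, hv⟩
    rw [pvScan]
    rw [show PySem.List.pyGet? ws ((m : Int)) = some ws[m] from pv_pyGet_nat ws m hmlt]
    simp only [List.foldl_cons, List.foldl_nil, Option.toList_some, hv, Option.getD_some, pvMatch]
    by_cases h2 : PySem.Chars.isIn ['m', '2'] ws[m].toList = true
    · simp [h2]
    · by_cases h1 : PySem.Chars.isIn ['m', 'e', 't', 'r', 'o', 's'] ws[m].toList = true
      · simp [h1, h2]
      · simp [h1, h2]

theorem pv_scan_some_match (ws : List String) :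
    ∀ (n : Nat), n ≤ ws.length →
      pvScan ws n ≠ none → ∃ w ∈ ws, pvMatch w = true := by
  intro n
  induction n with
  | zero => intro _ h; simp [pvScan] at h
  | succ j ih =>
    intro hn h
    have hj : j < ws.length := by omega
    rw [pvScan] at h
    rw [pv_pyGet_nat ws j hj] at h
    by_cases hm : pvMatch ws[j] = true
    · exact ⟨ws[j], List.getElem_mem hj, hm⟩
    · rw [Option.getD_some, if_neg hm] at h
      exact ih (by omega) h

-- ===== VERDICT (by name: the statement is the Claim_ definition above) =====
theorem checar_area_spec : Claim_equal_checar_area := by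
  intro frase _
  simp only [Spec_checar_area, checar_area, checar_area_alt]
  by_cases hg : (PySem.Str.isIn "metros" frase || PySem.Str.isIn "m2" frase) = true
  · rw [if_pos hg]
    have hfull : (PySem.List.enumerate (PySem.Str.split₀ frase)).take (PySem.Str.split₀ frase).length
        = PySem.List.enumerate (PySem.Str.split₀ frase) := by
      rw [← PySem.List.length_enumerate (PySem.Str.split₀ frase) 0, List.take_length]
    have := pv_foldl_eq_scan (PySem.Str.split₀ frase) (PySem.Str.split₀ frase).length le_rfl "nao informado"
    rw [hfull] at this
    rw [this, pv_altLoop_eq]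
  · rw [if_neg hg]
    rw [pv_altLoop_eq]
    have hnone : pvScan (PySem.Str.split₀ frase) (PySem.Str.split₀ frase).length = none := by
      by_contra hx
      rcases pv_scan_some_match (PySem.Str.split₀ frase) (PySem.Str.split₀ frase).length le_rfl hx with ⟨w, hw, hpm⟩
      have hinf := pv_mem_split₀_infix w frase hw
      simp [pvMatch] at hpm
      rcases hpm with h | h
      · have : PySem.Str.isIn "metros" frase = true := by
          rw [PySem.Str.isIn_iff_infix,
            show ("metros" : String).toList = ['m', 'e', 't', 'r', 'o', 's'] from by decide]
          exact ((PySem.Chars.isIn_iff_infix _ _).mp (by simpa using h)).trans hinf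
        simp at this
        exact hg (by simp [this])
      · have : PySem.Str.isIn "m2" frase = true := by
          rw [PySem.Str.isIn_iff_infix,
            show ("m2" : String).toList = ['m', '2'] from by decide]
          exact ((PySem.Chars.isIn_iff_infix _ _).mp (by simpa using h)).trans hinf
        simp at this
        exact hg (by simp [this])
    rw [hnone]
    rfl
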